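-- pv_equiv track=rewrite | github.com/yogeshhk/MidcurveNN | src/finetuning/data_validator.py | is_closed_profile
-- ===== SOURCE A (Python) =====
-- from typing import Tuple, Dict, List
--
-- def is_closed_profile(data: Dict) -> bool:
--     """Check if profile forms closed polygon"""
--     if not data or "Lines" not in data:
--         return False
--
--     lines = data["Lines"]
--     if len(lines) < 3:
--         return False
--
--     # Build connectivity graph
--     point_connections = {}
--     for line in lines:
--         p1, p2 = line[0], line[1]
--         point_connections[p1] = point_connections.get(p1, 0) + 1
--         point_connections[p2] = point_connections.get(p2, 0) + 1
--
--     # For closed polygon, each point should connect to exactly 2 lines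
--     return all(count == 2 for count in point_connections.values())
-- ===== SOURCE B (Python) =====
-- def is_closed_profile(data: dict) -> bool:
--     """Check if profile forms closed polygon (sort-then-scan-runs version)"""
--     if not data:
--         return False
--     lines = data.get("Lines")
--     if lines is None or len(lines) < 3:
--         return False
--
--     # Flatten all endpoints, sort, and require every run of equal points to have length 2
--     endpoints = sorted(p for line in lines for p in (line[0], line[1]))
--     i, n = 0, len(endpoints)
--     while i < n:
--         j = i + 1
--         while j < n and endpoints[j] == endpoints[i]:
--             j += 1
--         if j - i != 2:
--             return False
--         i = j
--     return True
-- ===== Notes on version B (the rewrite author's own statement) =====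
-- stated objective: alternative
-- what changed: Replaces the hash-map degree histogram (dict of point->count then all(count==2)) with flattening all endpoints into one list, sorting it, and scanning runs of equal points, returning False on any run length other than 2.
import Mathlib
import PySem

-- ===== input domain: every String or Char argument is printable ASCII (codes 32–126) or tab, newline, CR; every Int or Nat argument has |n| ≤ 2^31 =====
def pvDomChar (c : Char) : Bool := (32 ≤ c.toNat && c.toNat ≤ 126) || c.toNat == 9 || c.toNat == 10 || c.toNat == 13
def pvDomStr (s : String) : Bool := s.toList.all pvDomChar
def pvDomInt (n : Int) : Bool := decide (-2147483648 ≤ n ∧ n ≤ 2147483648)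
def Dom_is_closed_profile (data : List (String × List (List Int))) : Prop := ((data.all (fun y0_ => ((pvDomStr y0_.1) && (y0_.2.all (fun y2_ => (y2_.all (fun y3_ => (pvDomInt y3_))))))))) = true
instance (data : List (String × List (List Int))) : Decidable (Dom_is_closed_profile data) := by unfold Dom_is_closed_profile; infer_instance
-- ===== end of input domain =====

-- One honest line: B replaces A's hash-map degree histogram by flattening the
-- endpoints, sorting them and scanning runs of equal points (objective: alternative).

-- ===== PORT A =====
def is_closed_profile (data : List (String × List (List Int))) : Bool :=
  let d := PySem.Dict.ofList data
  if d.items.isEmpty || !(d.contains "Lines") then false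
  else
    match d.get? "Lines" with
    | none => false
    | some lines =>
      if lines.length < 3 then false
      else
        -- point_connections loop: two counter updates per line (line[0], line[1])
        let pc := lines.foldl (fun pc line =>
          match line with
          | p1 :: p2 :: _ => (pc.modify p1 0 (· + 1)).modify p2 0 (· + 1)
          | _ => pc) (PySem.Dict.empty : PySem.Dict Int Int)
        pc.values.all (fun c => c == 2)

-- ===== PORT B =====
-- line ↦ (line[0], line[1]) flattened, as Source B's generator expression does
def pvEnds : List Int → List Int
  | [] => []
  | [_] => []
  | p1 :: p2 :: _ => [p1, p2]

-- inner/outer while loops of Source B as structural recursion over the sorted list: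
-- pvRuns a c t: currently inside a run of value a of length c so far
def pvRuns (a : Int) (c : Nat) : List Int → Bool
  | [] => c == 2
  | b :: t => if b == a then pvRuns a (c + 1) t else (c == 2 && pvRuns b 1 t)

-- outer while loop over the sorted endpoint list (empty list: no runs, True)
def pvScan : List Int → Bool
  | [] => true
  | a :: t => pvRuns a 1 t

def is_closed_profile_alt (data : List (String × List (List Int))) : Bool :=
  if data.isEmpty then false
  else
    ((PySem.Dict.ofList data).get? "Lines").elim false (fun lines =>
      if lines.length < 3 then false
      else pvScan (PySem.List.sorted (lines.flatMap pvEnds) (fun x => x) false))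

-- ===== PRECONDITION & SPEC =====
-- Pre_ excludes exactly the inputs on which Python A raises IndexError: a
-- "Lines" value of length ≥ 3 containing a line with fewer than 2 entries.
def Pre_is_closed_profile (data : List (String × List (List Int))) : Prop :=
  (((PySem.Dict.ofList data).get? "Lines").all
    (fun lines => decide (lines.length < 3) || lines.all (fun l => 2 ≤ l.length))) = true
instance (data : List (String × List (List Int))) : Decidable (Pre_is_closed_profile data) := by unfold Pre_is_closed_profile; infer_instance
def pvWitness_is_closed_profile : (List (String × List (List Int))) :=
  [("Lines", [[0, 1], [1, 2], [2, 0]])]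
def Spec_is_closed_profile (data : List (String × List (List Int))) (out : Bool) : Prop := out = is_closed_profile_alt data
instance (data : List (String × List (List Int))) (out : Bool) : Decidable (Spec_is_closed_profile data out) := by unfold Spec_is_closed_profile; infer_instance

-- ===== CLAIM (what is proved, stated in full; the proofs are below) =====
def Claim_equal_is_closed_profile : Prop := ∀ (data : List (String × List (List Int))), Dom_is_closed_profile data → Pre_is_closed_profile data → Spec_is_closed_profile data (is_closed_profile data)

-- ===== LEMMAS AND PROOFS =====

-- A's two counter updates per line = one counter update per flattened endpoint
lemma foldA_eq_counter_fold (lines : List (List Int)) (d : PySem.Dict Int Int) :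
    lines.foldl (fun pc line =>
      match line with
      | p1 :: p2 :: _ => (pc.modify p1 0 (· + 1)).modify p2 0 (· + 1)
      | _ => pc) d
    = (lines.flatMap pvEnds).foldl (fun pc x => pc.modify x 0 (· + 1)) d := by
  induction lines generalizing d with
  | nil => rfl
  | cons l t ih =>
    cases l with
    | nil => simpa [pvEnds] using ih d
    | cons p1 rest =>
      cases rest with
      | nil => simpa [pvEnds] using ih d
      | cons p2 _ => simp [pvEnds, ih]

lemma cnt_cons_ne {b x : Int} (l : List Int) (h : x ≠ b) :
    (b :: l).count x = l.count x := by
  simp [Ne.symm h]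

lemma cnt_cons_self (b : Int) (l : List Int) :
    (b :: l).count b = l.count b + 1 := by
  simp

-- all values of counter E equal 2  ↔  every element occurs exactly twice in E
lemma counter_values_all_two (E : List Int) :
    ((PySem.Dict.counter E).values.all (fun c => c == 2) = true) ↔
      (∀ x ∈ E, E.count x = 2) := by
  unfold PySem.Dict.values
  rw [PySem.Dict.items_counter]
  simp only [List.map_map, List.all_eq_true, List.mem_map, Function.comp]
  constructor
  · intro h x hx
    have h' := h ((E.count x : Int)) ⟨x, (PySem.Set.mem_ofList E x).2 hx, rfl⟩
    have h2 : (E.count x : Int) = 2 := by simpa using h'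
    exact_mod_cast h2
  · rintro h c ⟨k, hk, rfl⟩
    have := h k ((PySem.Set.mem_ofList E k).1 hk)
    simp [this]

-- run-scan over a ≤-sorted tail
lemma pvRuns_iff (t : List Int) (a : Int) (c : Nat)
    (h : (a :: t).Pairwise (· ≤ ·)) :
    pvRuns a c t = true ↔ (c + t.count a = 2 ∧ ∀ x ∈ t, x ≠ a → t.count x = 2) := by
  induction t generalizing a c with
  | nil => simp [pvRuns]
  | cons b t' ih =>
    by_cases hba : b = a
    · subst hba
      have h' : (b :: t').Pairwise (· ≤ ·) := h.tail
      rw [show pvRuns b c (b :: t') = pvRuns b (c + 1) t' by simp [pvRuns], ih b (c + 1) h']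
      constructor
      · rintro ⟨h1, h2⟩
        refine ⟨by rw [cnt_cons_self]; omega, ?_⟩
        intro x hx hxa
        rcases List.mem_cons.1 hx with rfl | hx'
        · exact absurd rfl hxa
        · rw [cnt_cons_ne t' hxa]; exact h2 x hx' hxa
      · rintro ⟨h1, h2⟩
        rw [cnt_cons_self] at h1
        refine ⟨by omega, ?_⟩
        intro x hx hxa
        have := h2 x (List.mem_cons_of_mem b hx) hxa
        rwa [cnt_cons_ne t' hxa] at this
    · have hab : a ≤ b := (List.pairwise_cons.1 h).1 b (by simp)
      have hlt : a < b := lt_of_le_of_ne hab (fun e => hba e.symm)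
      have h' : (b :: t').Pairwise (· ≤ ·) := h.tail
      have hbt : ∀ x ∈ t', b ≤ x := (List.pairwise_cons.1 h').1
      have hanot : a ∉ t' := fun hm => absurd (hbt a hm) (by omega)
      have hane : a ≠ b := fun e => hba e.symm
      have hcnt : (b :: t').count a = 0 := by
        rw [cnt_cons_ne t' hane]; exact List.count_eq_zero.2 hanot
      rw [show pvRuns a c (b :: t') = (c == 2 && pvRuns b 1 t') by
            simp [pvRuns, hba]]
      rw [Bool.and_eq_true, beq_iff_eq, ih b 1 h', hcnt]
      constructor
      · rintro ⟨hc, h1, h2⟩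
        refine ⟨by omega, ?_⟩
        intro x hx hxa
        rcases List.mem_cons.1 hx with rfl | hx'
        · rw [cnt_cons_self]; omega
        · by_cases hxb : x = b
          · subst hxb; rw [cnt_cons_self]; omega
          · rw [cnt_cons_ne t' hxb]; exact h2 x hx' hxb
      · rintro ⟨hc, h2⟩
        have hb2 := h2 b (by simp) hba
        rw [cnt_cons_self] at hb2
        refine ⟨by omega, by omega, ?_⟩
        intro x hx hxb
        have hxa : x ≠ a := fun e => hanot (e ▸ hx)
        have := h2 x (List.mem_cons_of_mem b hx) hxa
        rwa [cnt_cons_ne t' hxb] at this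

-- B's run check on sorted E ↔ every element occurs exactly twice in E
lemma runcheck_iff (E : List Int) :
    (pvScan (PySem.List.sorted E (fun x => x) false) = true) ↔ (∀ x ∈ E, E.count x = 2) := by
  cases hs : PySem.List.sorted E (fun x => x) false with
  | nil =>
    have hE : E = [] := by
      have := PySem.List.sorted_perm E (fun x => x) false
      rw [hs] at this
      exact this.symm.eq_nil
    subst hE; simp [pvScan]
  | cons a t =>
    have hperm : (a :: t).Perm E := by
      have := PySem.List.sorted_perm E (fun x => x) false
      rwa [hs] at this
    have hpw : (a :: t).Pairwise (· ≤ ·) := by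
      have := PySem.List.sorted_pairwise E (fun x => x)
      rwa [hs] at this
    show pvRuns a 1 t = true ↔ _
    rw [pvRuns_iff t a 1 hpw]
    constructor
    · rintro ⟨h1, h2⟩ x hx
      rw [← hperm.count_eq x]
      by_cases hxa : x = a
      · subst hxa; rw [cnt_cons_self]; omega
      · rcases List.mem_cons.1 (hperm.mem_iff.2 hx) with rfl | hx'
        · exact absurd rfl hxa
        · rw [cnt_cons_ne t hxa]; exact h2 x hx' hxa
    · intro h
      have key : ∀ x ∈ a :: t, (a :: t).count x = 2 := fun x hx => by
        rw [hperm.count_eq x]; exact h x (hperm.mem_iff.1 hx)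
      have ha := key a (by simp)
      rw [cnt_cons_self] at ha
      refine ⟨by omega, ?_⟩
      intro x hx hxa
      have := key x (List.mem_cons_of_mem a hx)
      rwa [cnt_cons_ne t hxa] at this

-- ===== VERDICT (by name: the statement is the Claim_ definition above) =====
theorem is_closed_profile_spec : Claim_equal_is_closed_profile := by
  intro data _ _
  unfold Spec_is_closed_profile is_closed_profile is_closed_profile_alt
  cases data with
  | nil => rfl
  | cons p tl =>
    cases hg : (PySem.Dict.ofList (p :: tl)).get? "Lines" with
    | none =>
      have hc : (PySem.Dict.ofList (p :: tl)).contains "Lines" = false := by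
        rw [PySem.Dict.contains_eq_isSome_get?, hg]; rfl
      simp [hc]
    | some lines =>
      have hc : (PySem.Dict.ofList (p :: tl)).contains "Lines" = true := by
        rw [PySem.Dict.contains_eq_isSome_get?, hg]; rfl
      have hne : (PySem.Dict.ofList (p :: tl)).items.isEmpty = false := by
        have hmem := (PySem.Dict.contains_iff_mem_keys _ _).1 hc
        cases hi : (PySem.Dict.ofList (p :: tl)).items with
        | nil => simp only [PySem.Dict.keys, hi, List.map_nil] at hmem; exact absurd hmem (List.not_mem_nil)
        | cons q r => simp
      simp only [hne, hc, hg, Bool.not_true, Bool.or_false, List.isEmpty_cons, Option.elim_some]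
      by_cases hlen : lines.length < 3
      · simp [hlen]
      · simp only [hlen, Bool.false_eq_true, if_false]
        refine Eq.trans (congrArg (fun d => d.values.all (fun c => c == 2))
          ((foldA_eq_counter_fold lines PySem.Dict.empty).trans
            (PySem.Dict.counter_eq_foldl _).symm)) ?_
        have hA := counter_values_all_two (lines.flatMap pvEnds)
        have hB := runcheck_iff (lines.flatMap pvEnds)
        exact Bool.eq_iff_iff.mpr (hA.trans hB.symm)
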